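-- pv_equiv track=rewrite | github.com/Joanna-Wu-Weijia/Project_01_CI-STHPAN | CI-STHPAN_self_supervised/scripts/step1_qlib_to_csv.py | _count_by_prefix
-- ===== SOURCE A (Python) =====
-- def _count_by_prefix(tickers):
--     """统计 SH/SZ/BJ 数量（用于日志）。"""
--     sh = sz = bj = 0
--     for t in tickers:
--         u = str(t).upper()
--         if u.startswith("SH"):
--             sh += 1
--         elif u.startswith("SZ"):
--             sz += 1
--         elif u.startswith("BJ"):
--             bj += 1
--     return sh, sz, bj
-- ===== SOURCE B (Python) =====
-- def _count_by_prefix(tickers):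
--     """统计 SH/SZ/BJ 数量（用于日志）。"""
--     prefixes = [str(t).upper()[:2] for t in tickers]
--     return prefixes.count("SH"), prefixes.count("SZ"), prefixes.count("BJ")
-- ===== Notes on version B (the rewrite author's own statement) =====
-- stated objective: idiomatic
-- what changed: Replaces the single pass with per-element if/elif branching and three running counters by building the list of two-character uppercased prefixes once and reading the three results off with list.count, a table/scan decomposition with no explicit branching.
import Mathlib
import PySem

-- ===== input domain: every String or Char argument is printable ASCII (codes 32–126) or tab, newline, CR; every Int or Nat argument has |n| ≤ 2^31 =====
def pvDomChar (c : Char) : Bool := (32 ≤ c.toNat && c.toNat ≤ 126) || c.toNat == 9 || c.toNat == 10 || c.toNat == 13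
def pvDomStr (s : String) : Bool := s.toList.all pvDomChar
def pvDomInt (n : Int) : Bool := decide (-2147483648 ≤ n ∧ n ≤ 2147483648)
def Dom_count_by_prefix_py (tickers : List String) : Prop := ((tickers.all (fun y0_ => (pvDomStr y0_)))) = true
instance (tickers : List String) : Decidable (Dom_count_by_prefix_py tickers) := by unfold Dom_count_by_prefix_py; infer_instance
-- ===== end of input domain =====

-- B builds the list of two-char uppercased prefixes once and reads each count off with list.count (idiomatic scan decomposition); same results, same cost.

-- ===== PORT A =====
def count_by_prefix_py (tickers : List String) : Int × Int × Int :=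
  let r := tickers.foldl (fun (acc : Int × Int × Int) t =>
    let u := PySem.Str.upper t
    if PySem.Str.startswith u "SH" then (acc.1 + 1, acc.2.1, acc.2.2)
    else if PySem.Str.startswith u "SZ" then (acc.1, acc.2.1 + 1, acc.2.2)
    else if PySem.Str.startswith u "BJ" then (acc.1, acc.2.1, acc.2.2 + 1)
    else acc) (0, 0, 0)
  r

-- ===== PORT B =====
def count_by_prefix_py_alt (tickers : List String) : Int × Int × Int :=
  let prefixes := tickers.map (fun t => PySem.Str.slice (PySem.Str.upper t) none (some 2))
  ((prefixes.count "SH" : Int), (prefixes.count "SZ" : Int), (prefixes.count "BJ" : Int))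

-- ===== PRECONDITION & SPEC =====
def Spec_count_by_prefix_py (tickers : List String) (out : Int × Int × Int) : Prop := out = count_by_prefix_py_alt tickers
instance (tickers : List String) (out : Int × Int × Int) : Decidable (Spec_count_by_prefix_py tickers out) := by unfold Spec_count_by_prefix_py; infer_instance

-- ===== CLAIM (what is proved, stated in full; the proofs are below) =====
def Claim_equal_count_by_prefix_py : Prop := ∀ (tickers : List String), Dom_count_by_prefix_py tickers → Spec_count_by_prefix_py tickers (count_by_prefix_py tickers)

-- ===== LEMMAS AND PROOFS =====

-- u[:2] = p  ↔  u.startswith(p), for a two-character p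
theorem pfx2_eq_iff (u p : String) (hp : p.toList.length = 2) :
    (PySem.Str.slice u none (some 2) = p) ↔ PySem.Str.startswith u p = true := by
  rw [PySem.Str.startswith_eq, PySem.Chars.startswith_iff, List.prefix_iff_eq_take, hp]
  constructor
  · intro h
    have h' : (PySem.Str.slice u none (some 2)).toList = p.toList := by rw [h]
    rw [PySem.Str.toList_slice] at h'
    simp only [PySem.Chars.slice_eq_listSlice] at h'
    rw [PySem.List.slice_to _ (by norm_num)] at h'
    simpa using h'.symm
  · intro h
    apply String.toList_injective
    rw [PySem.Str.toList_slice]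
    simp only [PySem.Chars.slice_eq_listSlice]
    rw [PySem.List.slice_to _ (by norm_num)]
    simpa using h.symm

theorem pfx2_ne_of_not_start (u p : String) (hp : p.toList.length = 2)
    (h : ¬ PySem.Str.startswith u p = true) :
    PySem.Str.slice u none (some 2) ≠ p := fun he => h ((pfx2_eq_iff u p hp).1 he)

-- loop invariant: the fold from (a,b,c) adds the three prefix counts
theorem fold_eq_counts (ts : List String) (a b c : Int) :
    ts.foldl (fun (acc : Int × Int × Int) t =>
      let u := PySem.Str.upper t
      if PySem.Str.startswith u "SH" then (acc.1 + 1, acc.2.1, acc.2.2)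
      else if PySem.Str.startswith u "SZ" then (acc.1, acc.2.1 + 1, acc.2.2)
      else if PySem.Str.startswith u "BJ" then (acc.1, acc.2.1, acc.2.2 + 1)
      else acc) (a, b, c) =
    (a + ((ts.map (fun t => PySem.Str.slice (PySem.Str.upper t) none (some 2))).count "SH" : Int),
     b + ((ts.map (fun t => PySem.Str.slice (PySem.Str.upper t) none (some 2))).count "SZ" : Int),
     c + ((ts.map (fun t => PySem.Str.slice (PySem.Str.upper t) none (some 2))).count "BJ" : Int)) := by
  induction ts generalizing a b c with
  | nil => simp
  | cons t ts ih =>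
    simp only [List.foldl_cons, List.map_cons]
    by_cases h1 : PySem.Str.startswith (PySem.Str.upper t) "SH" = true
    · have e1 : PySem.Str.slice (PySem.Str.upper t) none (some 2) = "SH" :=
        (pfx2_eq_iff _ _ (by decide)).2 h1
      rw [if_pos h1, ih, e1, List.count_cons_self,
          List.count_cons_of_ne (by decide : ("SH" : String) ≠ "SZ"),
          List.count_cons_of_ne (by decide : ("SH" : String) ≠ "BJ")]
      simp only [Prod.mk.injEq, and_true]
      push_cast
      ring
    · have e1 := pfx2_ne_of_not_start (PySem.Str.upper t) "SH" (by decide) h1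
      by_cases h2 : PySem.Str.startswith (PySem.Str.upper t) "SZ" = true
      · have e2 : PySem.Str.slice (PySem.Str.upper t) none (some 2) = "SZ" :=
          (pfx2_eq_iff _ _ (by decide)).2 h2
        rw [if_neg h1, if_pos h2, ih, e2, List.count_cons_self,
            List.count_cons_of_ne (by decide : ("SZ" : String) ≠ "SH"),
            List.count_cons_of_ne (by decide : ("SZ" : String) ≠ "BJ")]
        simp only [Prod.mk.injEq, and_true, true_and]
        push_cast
        ring
      · have e2 := pfx2_ne_of_not_start (PySem.Str.upper t) "SZ" (by decide) h2
        by_cases h3 : PySem.Str.startswith (PySem.Str.upper t) "BJ" = true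
        · have e3 : PySem.Str.slice (PySem.Str.upper t) none (some 2) = "BJ" :=
            (pfx2_eq_iff _ _ (by decide)).2 h3
          rw [if_neg h1, if_neg h2, if_pos h3, ih, e3, List.count_cons_self,
              List.count_cons_of_ne (by decide : ("BJ" : String) ≠ "SH"),
              List.count_cons_of_ne (by decide : ("BJ" : String) ≠ "SZ")]
          simp only [Prod.mk.injEq, true_and]
          push_cast
          ring
        · have e3 := pfx2_ne_of_not_start (PySem.Str.upper t) "BJ" (by decide) h3
          rw [if_neg h1, if_neg h2, if_neg h3, ih,
              List.count_cons_of_ne e1,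
              List.count_cons_of_ne e2, List.count_cons_of_ne e3]

-- ===== VERDICT (by name: the statement is the Claim_ definition above) =====
theorem count_by_prefix_py_spec : Claim_equal_count_by_prefix_py := by
  intro tickers _
  unfold Spec_count_by_prefix_py count_by_prefix_py count_by_prefix_py_alt
  simp only [fold_eq_counts, zero_add]
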